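-- pv_equiv track=rewrite | github.com/sincheol/leetcode_s | problems/b_w3_22351.py | calc
-- ===== SOURCE A (Python) =====
-- def calc(input):
--     l_in = len(input)
--     l = list(map(int,[input[0],input[:2],input[:3]]))
--
--     for i in l:
--         tmp = i
--         s = ""
--
--         while len(s)<l_in:
--             s += str(tmp)
--
--             if s == input:
--                 return i, tmp
--
--             tmp+=1
-- ===== SOURCE B (Python) =====
-- def calc(input):
--     l_in = len(input)
--     for start in map(int, [input[0], input[:2], input[:3]]):
--         pos, cur = 0, start
--         while pos < l_in:
--             snum = str(cur)
--             if input[pos:pos + len(snum)] == snum: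
--                 pos += len(snum)
--                 cur += 1
--             else:
--                 break
--         if pos == l_in:
--             return start, cur - 1
-- ===== Notes on version B (the rewrite author's own statement) =====
-- stated objective: faster
-- what changed: A verifies each candidate by accumulating a growing string and comparing the whole accumulator against the whole input at every step; B walks an index pointer and matches each successive number against the corresponding slice, never building or re-comparing the full string.
import Mathlib
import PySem

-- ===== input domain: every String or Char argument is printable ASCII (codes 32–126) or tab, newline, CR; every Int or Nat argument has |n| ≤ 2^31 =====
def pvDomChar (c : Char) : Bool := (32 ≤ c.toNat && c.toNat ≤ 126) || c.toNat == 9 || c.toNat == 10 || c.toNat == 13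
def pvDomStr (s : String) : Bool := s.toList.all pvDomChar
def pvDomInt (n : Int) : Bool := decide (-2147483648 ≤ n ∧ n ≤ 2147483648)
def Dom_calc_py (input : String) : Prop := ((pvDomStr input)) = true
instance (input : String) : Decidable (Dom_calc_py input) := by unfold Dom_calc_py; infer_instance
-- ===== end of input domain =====

-- B replaces A's growing accumulator string (re-compared in full against the whole
-- input at every step) by an index pointer matched number-by-number: simpler and one pass.

-- ===== PORT A =====
-- A's inner while loop: s grows by str(tmp) each step, compared with the whole input.
-- Fuel: the loop runs at most len(input) iterations (str(tmp) is never empty), so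
-- fuel = len(input) + 1 is never exhausted; fuel-out returns none, matching the exit.
def pvLoopA (input : List Char) (i : Int) : Nat → Int → List Char → Option (Int × Int)
  | 0, _, _ => none
  | fuel + 1, tmp, s =>
    if s.length < input.length then
      let s' := s ++ PySem.Int.toChars tmp
      if s' = input then some (i, tmp)
      else pvLoopA input i fuel (tmp + 1) s'
    else none

-- A's for-loop over the candidate list: first candidate whose inner loop returns wins.
def pvTryA (input : List Char) : List Int → Option (Int × Int)
  | [] => none
  | i :: rest =>
    match pvLoopA input i (input.length + 1) i [] with
    | some r => some r
    | none => pvTryA input rest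

def calc_py (input : String) : Option (Int × Int) :=
  let cs := input.toList
  match PySem.List.pyGet? cs 0 with
  | none => none      -- input[0]: IndexError on "", excluded by Pre_
  | some c0 =>
    match PySem.Int.ofChars? [c0],
          PySem.Int.ofChars? (PySem.List.slice cs none (some 2)),
          PySem.Int.ofChars? (PySem.List.slice cs none (some 3)) with
    | some a, some b, some c => pvTryA cs [a, b, c]
    | _, _, _ => none  -- int(...): ValueError, excluded by Pre_

-- ===== PORT B =====
-- B's inner while loop: pointer pos, current number cur; same fuel bound as A's loop.
def pvLoopB (input : List Char) : Nat → Nat → Int → Nat × Int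
  | 0, pos, cur => (pos, cur)
  | fuel + 1, pos, cur =>
    if pos < input.length then
      let snum := PySem.Int.toChars cur
      if PySem.List.slice input (some (pos : Int)) (some ((pos : Int) + (snum.length : Int))) = snum then
        pvLoopB input fuel (pos + snum.length) (cur + 1)
      else (pos, cur)
    else (pos, cur)

def pvCheckB (input : List Char) (start : Int) : Option (Int × Int) :=
  let r := pvLoopB input (input.length + 1) 0 start
  if r.1 = input.length then some (start, r.2 - 1) else none

def pvTryB (input : List Char) : List Int → Option (Int × Int)
  | [] => none
  | st :: rest =>
    match pvCheckB input st with
    | some r => some r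
    | none => pvTryB input rest

def calc_py_alt (input : String) : Option (Int × Int) :=
  let cs := input.toList
  match PySem.List.pyGet? cs 0 with
  | some c0 =>
    match PySem.Int.ofChars? [c0] with
    | some a =>
      match PySem.Int.ofChars? (PySem.List.slice cs none (some 2)) with
      | some b =>
        match PySem.Int.ofChars? (PySem.List.slice cs none (some 3)) with
        | some c => pvTryB cs [a, b, c]
        | none => none
      | none => none
    | none => none
  | none => none      -- input[0]: IndexError on "", excluded by Pre_

-- ===== PRECONDITION & SPEC =====
-- Pre_ excludes exactly the inputs where A raises: the empty string (IndexError on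
-- input[0]) and strings where int() fails on input[0], input[:2] or input[:3] (ValueError).
def Pre_calc_py (input : String) : Prop :=
  input.toList ≠ [] ∧
  (PySem.Int.ofChars? (input.toList.take 1)).isSome = true ∧
  (PySem.Int.ofChars? (input.toList.take 2)).isSome = true ∧
  (PySem.Int.ofChars? (input.toList.take 3)).isSome = true
instance (input : String) : Decidable (Pre_calc_py input) := by unfold Pre_calc_py; infer_instance

def pvWitness_calc_py : String := "91011"

def Spec_calc_py (input : String) (out : Option (Int × Int)) : Prop := out = calc_py_alt input
instance (input : String) (out : Option (Int × Int)) : Decidable (Spec_calc_py input out) := by unfold Spec_calc_py; infer_instance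

-- ===== CLAIM (what is proved, stated in full; the proofs are below) =====
def Claim_equal_calc_py : Prop := ∀ (input : String), Dom_calc_py input → Pre_calc_py input → Spec_calc_py input (calc_py input)

-- ===== LEMMAS AND PROOFS =====

-- If s is not a prefix of input, A's loop can never succeed: every later s' has s as prefix.
theorem pvLoopA_not_prefix (input : List Char) (i : Int) :
    ∀ (fuel : Nat) (tmp : Int) (s : List Char), ¬ s <+: input →
      pvLoopA input i fuel tmp s = none := by
  intro fuel
  induction fuel with
  | zero => intro tmp s _; rfl
  | succ n ih =>
    intro tmp s hnp
    simp only [pvLoopA]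
    split
    · have h1 : s <+: s ++ PySem.Int.toChars tmp := List.prefix_append s _
      rw [if_neg]
      · exact ih (tmp + 1) _ (fun h => hnp (h1.trans h))
      · intro he; exact hnp (he ▸ h1)
    · rfl

theorem pvLoopB_done (input : List Char) (fuel : Nat) (pos : Nat) (cur : Int)
    (h : ¬ pos < input.length) : pvLoopB input fuel pos cur = (pos, cur) := by
  cases fuel with
  | zero => rfl
  | succ n => simp only [pvLoopB, if_neg h]

-- Main correspondence: A at accumulator input.take pos ↔ B at pointer pos.
theorem pvLoop_corr (input : List Char) (i : Int) :
    ∀ (fuel : Nat) (pos : Nat) (tmp : Int), pos < input.length →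
      pvLoopA input i fuel tmp (input.take pos) =
        (let r := pvLoopB input fuel pos tmp
         if r.1 = input.length then some (i, r.2 - 1) else none) := by
  intro fuel
  induction fuel with
  | zero =>
    intro pos tmp hpos
    simp only [pvLoopA, pvLoopB]
    rw [if_neg (by omega)]
  | succ n ih =>
    intro pos tmp hpos
    have hlen : (input.take pos).length = pos := by simp [hpos.le]
    set snum := PySem.Int.toChars tmp with hsn
    set k := snum.length with hk
    simp only [pvLoopA, pvLoopB, PySem.List.slice_natCast_add, if_pos hpos]
    rw [if_pos (by omega)]
    by_cases hm : (input.drop pos).take k = snum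
    · -- slice matched: A's new accumulator is input.take (pos + k)
      have hklen : k ≤ input.length - pos := by
        have := congrArg List.length hm
        simp at this; omega
      have hs' : input.take pos ++ snum = input.take (pos + k) := by
        rw [List.take_add]; exact congrArg _ hm.symm
      rw [if_pos hm]
      by_cases hend : pos + k = input.length
      · have : input.take pos ++ snum = input := by
          rw [hs', hend, List.take_length]
        rw [if_pos this, pvLoopB_done input n (pos + k) (tmp + 1) (by omega)]
        simp [hend]
      · have hlt : pos + k < input.length := by omega
        have hne : input.take pos ++ snum ≠ input := by
          intro he
          have := congrArg List.length he
          rw [hs'] at this; simp [hlt.le] at this; omega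
        rw [if_neg hne, hs']
        exact ih (pos + k) (tmp + 1) hlt
    · -- slice mismatched: B stops; A's accumulator left the prefixes of input for good
      have hnp : ¬ (input.take pos ++ snum) <+: input := by
        intro hpre
        obtain ⟨t, ht⟩ := hpre
        apply hm
        have h2 : input.take pos ++ (snum ++ t) = input := by
          rw [← List.append_assoc]; exact ht
        have h3 : input.take pos ++ input.drop pos = input.take pos ++ (snum ++ t) := by
          rw [List.take_append_drop, h2]
        have hdrop : List.drop pos input = snum ++ t := List.append_cancel_left h3
        rw [hdrop]
        exact List.take_left
      have hne : input.take pos ++ snum ≠ input := by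
        intro he; exact hnp ⟨[], by simp [he]⟩
      rw [if_neg hne, if_neg hm,
        pvLoopA_not_prefix input i n (tmp + 1) (input.take pos ++ snum) hnp]
      rw [if_neg (by omega)]

theorem pvCand_corr (input : List Char) (i : Int) (h : input ≠ []) :
    pvLoopA input i (input.length + 1) i [] = pvCheckB input i := by
  have hpos : 0 < input.length := List.length_pos_of_ne_nil h
  have := pvLoop_corr input i (input.length + 1) 0 i hpos
  simpa [pvCheckB] using this

theorem pvTry_corr (input : List Char) (h : input ≠ []) :
    ∀ (l : List Int), pvTryA input l = pvTryB input l := by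
  intro l
  induction l with
  | nil => rfl
  | cons i rest ih =>
    simp only [pvTryA, pvTryB, ← pvCand_corr input i h, ih]

-- ===== VERDICT (by name: the statement is the Claim_ definition above) =====
theorem calc_py_spec : Claim_equal_calc_py := by
  intro input _ _
  unfold Spec_calc_py calc_py calc_py_alt
  cases hcs : input.toList with
  | nil => rfl
  | cons c rest =>
    simp only [PySem.List.pyGet?_zero_cons]
    cases PySem.Int.ofChars? [c] with
    | none => rfl
    | some a =>
      cases PySem.Int.ofChars? (PySem.List.slice (c :: rest) none (some 2)) with
      | none => rfl
      | some b =>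
        cases PySem.Int.ofChars? (PySem.List.slice (c :: rest) none (some 3)) with
        | none => rfl
        | some c' => exact pvTry_corr (c :: rest) (by simp) [a, b, c']
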